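-- pv_equiv track=rewrite | github.com/dpitch40/tutoring | python/heap_util.py | visualize_heap
-- ===== SOURCE A (Python) =====
-- def left_heap_child(i):
--     return 2*i + 1
--
-- def right_heap_child(i):
--     return 2*i + 2
--
-- def visualize_heap(l):
--     length = len(l)
--     start_row = 0
--     end_row = 0
--     rows = list()
--     while start_row < length:
--         rows.append(l[start_row:end_row+1])
--         start_row = left_heap_child(start_row)
--         end_row = right_heap_child(end_row)
--
--     return '\n'.join(map(str, rows))
-- ===== SOURCE B (Python) =====
-- def visualize_heap(l):
--     rows = []
--     for j, x in enumerate(l):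
--         level = (j + 1).bit_length() - 1
--         if level == len(rows):
--             rows.append([x])
--         else:
--             rows[level].append(x)
--     return '\n'.join(map(str, rows))
-- ===== Notes on version B (the rewrite author's own statement) =====
-- stated objective: alternative
-- what changed: Replaces the while-loop that cuts level slices via doubling start/end boundaries with a single element-by-element pass that routes each l[j] into its row computed from the tree depth (j+1).bit_length()-1, growing the row list as new depths appear.
import Mathlib
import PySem

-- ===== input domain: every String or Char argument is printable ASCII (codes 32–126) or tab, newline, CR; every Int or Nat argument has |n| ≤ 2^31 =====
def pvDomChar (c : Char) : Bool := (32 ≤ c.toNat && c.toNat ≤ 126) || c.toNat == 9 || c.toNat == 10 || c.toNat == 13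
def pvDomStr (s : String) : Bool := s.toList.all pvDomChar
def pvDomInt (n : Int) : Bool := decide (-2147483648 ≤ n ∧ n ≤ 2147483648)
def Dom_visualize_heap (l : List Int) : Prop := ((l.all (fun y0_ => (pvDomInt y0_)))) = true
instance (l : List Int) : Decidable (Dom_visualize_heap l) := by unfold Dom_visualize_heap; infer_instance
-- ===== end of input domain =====

-- B replaces A's doubling-boundary level slicing with a single pass that buckets each
-- element into its row by computed tree depth (bit_length); objective: alternative, same cost.

-- shared helper: Python's str([x1, ..., xn]) for a list of ints, e.g. "[1, 2]"
def pyStrIntList (xs : List Int) : String :=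
  PySem.Str.join "" ["[", PySem.Str.join ", " (xs.map PySem.Int.toStr), "]"]

-- ===== PORT A =====
def left_heap_child (i : Nat) : Nat := 2 * i + 1

def right_heap_child (i : Nat) : Nat := 2 * i + 2

-- the while loop of A; start_row/end_row are always ≥ 0, kept as Nat
def visualize_heap_go (l : List Int) (start_row end_row : Nat) : List (List Int) :=
  if h : start_row < l.length then
    PySem.List.slice l (some (start_row : Int)) (some ((end_row : Int) + 1)) ::
      visualize_heap_go l (left_heap_child start_row) (right_heap_child end_row)
  else []
termination_by l.length - start_row
decreasing_by simp only [left_heap_child]; omega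

def visualize_heap (l : List Int) : String :=
  PySem.Str.join "\n" ((visualize_heap_go l 0 0).map pyStrIntList)

-- ===== PORT B =====
-- int.bit_length() for a nonnegative Python int (exact: 0 for 0, floor(log2 n)+1 otherwise)
def pyBitLength (n : Nat) : Nat := if n = 0 then 0 else Nat.log2 n + 1

-- the `for j, x in enumerate(l)` loop of B, carrying the rows accumulator
def visualize_heap_alt_go (j : Nat) (xs : List Int) (rows : List (List Int)) :
    List (List Int) :=
  match xs with
  | [] => rows
  | x :: t =>
    let level := pyBitLength (j + 1) - 1
    visualize_heap_alt_go (j + 1) t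
      (if level = rows.length then rows ++ [[x]] else rows.modify level (· ++ [x]))

def visualize_heap_alt (l : List Int) : String :=
  PySem.Str.join "\n" ((visualize_heap_alt_go 0 l []).map pyStrIntList)

-- ===== PRECONDITION & SPEC =====
def Spec_visualize_heap (l : List Int) (out : String) : Prop := out = visualize_heap_alt l
instance (l : List Int) (out : String) : Decidable (Spec_visualize_heap l out) := by unfold Spec_visualize_heap; infer_instance

-- ===== CLAIM (what is proved, stated in full; the proofs are below) =====
def Claim_equal_visualize_heap : Prop := ∀ (l : List Int), Dom_visualize_heap l → Spec_visualize_heap l (visualize_heap l)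

-- ===== LEMMAS AND PROOFS =====

-- canonical description of the heap rows: successive chunks of widths w+1, 2(w+1), 4(w+1), …
def chunks : List Int → Nat → List (List Int)
  | [], _ => []
  | x :: t, w => (x :: t).take (w + 1) :: chunks (t.drop w) (2 * w + 1)
termination_by xs _ => xs.length
decreasing_by simp

theorem chunks_nil (w : Nat) : chunks [] w = [] := by rw [chunks.eq_def]

theorem chunks_cons (x : Int) (t : List Int) (w : Nat) :
    chunks (x :: t) w = (x :: t).take (w + 1) :: chunks (t.drop w) (2 * w + 1) := by
  conv_lhs => rw [chunks.eq_def]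

theorem log2_eq_of (k m : Nat) (h1 : 2 ^ k ≤ m) (h2 : m < 2 ^ (k + 1)) :
    Nat.log2 m = k := by
  rw [Nat.log2_eq_log_two]; exact Nat.log_eq_of_pow_le_of_lt_pow h1 h2

theorem modify_append_last {α : Type} [Inhabited α] (rows : List α) (r : α) (f : α → α) :
    (rows ++ [r]).modify rows.length f = rows ++ [f r] := by
  rw [List.modify_eq_set, List.getElem?_concat_length]
  simp

-- A's loop computes the chunk decomposition (invariant: end_row = 2 * start_row)
theorem goA_eq_chunks (l : List Int) :
    ∀ n s, l.length - s ≤ n → visualize_heap_go l s (2 * s) = chunks (l.drop s) s := by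
  intro n
  induction n with
  | zero =>
    intro s hs
    rw [visualize_heap_go]
    have hle : l.length ≤ s := by omega
    rw [dif_neg (by omega), List.drop_eq_nil_iff.mpr hle, chunks_nil]
  | succ n ih =>
    intro s hs
    rw [visualize_heap_go]
    by_cases h : s < l.length
    · rw [dif_pos h]
      obtain ⟨x, t, hxt⟩ : ∃ x t, l.drop s = x :: t := by
        cases hd : l.drop s with
        | nil => exact absurd (List.drop_eq_nil_iff.mp hd) (by omega)
        | cons x t => exact ⟨x, t, rfl⟩
      rw [hxt, chunks_cons]
      have hslice : PySem.List.slice l (some (s : Int)) (some ((2 * s : Nat) + 1 : Int))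
          = (x :: t).take (s + 1) := by
        have : ((2 * s : Nat) : Int) + 1 = ((2 * s + 1 : Nat) : Int) := by push_cast; ring
        rw [this, PySem.List.slice_natCast, hxt]
        congr 1
        omega
      have hrec : visualize_heap_go l (left_heap_child s) (right_heap_child (2 * s))
          = chunks (t.drop s) (2 * s + 1) := by
        have h1 : right_heap_child (2 * s) = 2 * (2 * s + 1) := by
          simp [right_heap_child]; ring
        have h2 : l.drop (2 * s + 1) = t.drop s := by
          have : t.drop s = (x :: t).drop (s + 1) := by simp
          rw [this, ← hxt, List.drop_drop]
          congr 1
          omega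
        rw [show left_heap_child s = 2 * s + 1 from rfl, h1,
          ih (2 * s + 1) (by omega), h2]
      rw [hslice, hrec]
    · rw [dif_neg h, List.drop_eq_nil_iff.mpr (by omega), chunks_nil]

-- bit_length-derived level of index j = 2^(k+1) - 1 - c (with 1 ≤ c ≤ 2^k - 1 … or j+1 = 2^k)
theorem level_eq (k m : Nat) (h1 : 2 ^ k ≤ m) (h2 : m < 2 ^ (k + 1)) :
    pyBitLength m - 1 = k := by
  have hm : m ≠ 0 := by have := Nat.one_le_two_pow (n := k); omega
  simp [pyBitLength, hm, log2_eq_of k m h1 h2]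

-- filling the current (last, partially built) row r, with c free slots left in it
theorem fill (k : Nat) :
    ∀ (t : List Int) (c : Nat) (r : List Int) (rows : List (List Int)),
      rows.length = k → c ≤ 2 ^ k - 1 →
      (∀ xs' : List Int, xs'.length ≤ t.length → ∀ rows' : List (List Int),
        rows'.length = k + 1 →
        visualize_heap_alt_go (2 ^ (k + 1) - 1) xs' rows'
          = rows' ++ chunks xs' (2 ^ (k + 1) - 1)) →
      visualize_heap_alt_go (2 ^ (k + 1) - 1 - c) t (rows ++ [r])
        = rows ++ (r ++ t.take c) :: chunks (t.drop c) (2 ^ (k + 1) - 1) := by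
  intro t
  induction t with
  | nil =>
    intro c r rows hlen hc _
    simp [visualize_heap_alt_go, chunks_nil]
  | cons x t' ih =>
    intro c r rows hlen hc hmain
    have hk1 : (1:Nat) ≤ 2 ^ k := Nat.one_le_two_pow
    have hk2 : 2 ^ (k + 1) = 2 * 2 ^ k := by ring
    cases c with
    | zero =>
      have := hmain (x :: t') (by simp) (rows ++ [r]) (by simp [hlen])
      simpa [List.append_assoc] using this
    | succ c' =>
      rw [visualize_heap_alt_go]
      have hj : 2 ^ (k + 1) - 1 - (c' + 1) + 1 = 2 ^ (k + 1) - (c' + 1) := by omega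
      have hlev : pyBitLength (2 ^ (k + 1) - 1 - (c' + 1) + 1) - 1 = k := by
        rw [hj]; exact level_eq k _ (by omega) (by omega)
      have hne : ¬ (k = (rows ++ [r]).length) := by simp [hlen]
      simp only [hlev, hne, if_false]
      have hmod : (rows ++ [r]).modify k (· ++ [x]) = rows ++ [r ++ [x]] := by
        rw [← hlen]; exact modify_append_last rows r _
      rw [hmod]
      have hstep : 2 ^ (k + 1) - 1 - (c' + 1) + 1 = 2 ^ (k + 1) - 1 - c' := by omega
      rw [hstep, ih c' (r ++ [x]) rows hlen (by omega)
        (fun xs' hxs' => hmain xs' (by simp; omega))]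
      simp [List.append_assoc]
  
-- B's loop, started at a row boundary with k complete rows, appends the chunk decomposition
theorem goB_eq_chunks :
    ∀ (n : Nat) (xs : List Int), xs.length ≤ n → ∀ (k : Nat) (rows : List (List Int)),
      rows.length = k →
      visualize_heap_alt_go (2 ^ k - 1) xs rows = rows ++ chunks xs (2 ^ k - 1) := by
  intro n
  induction n with
  | zero =>
    intro xs hxs k rows hlen
    have : xs = [] := List.length_eq_zero_iff.mp (by omega)
    simp [this, visualize_heap_alt_go, chunks_nil]
  | succ n ih =>
    intro xs hxs k rows hlen
    cases xs with
    | nil => simp [visualize_heap_alt_go, chunks_nil]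
    | cons x t =>
      rw [visualize_heap_alt_go]
      have hk1 : (1:Nat) ≤ 2 ^ k := Nat.one_le_two_pow
      have hj : 2 ^ k - 1 + 1 = 2 ^ k := by omega
      have hlev : pyBitLength (2 ^ k - 1 + 1) - 1 = k := by
        rw [hj]; exact level_eq k _ (by omega) (by simp [pow_succ])
      simp only [hlev, hlen, if_true]
      have hfill := fill k t (2 ^ k - 1) [x] rows hlen (le_refl _)
        (fun xs' hxs' rows' hr => ih xs' (by simp at hxs; omega) (k + 1) rows' hr)
      have harg : 2 ^ k - 1 + 1 = 2 ^ (k + 1) - 1 - (2 ^ k - 1) := by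
        have : 2 ^ (k + 1) = 2 * 2 ^ k := by ring
        omega
      rw [harg, hfill, chunks_cons]
      have hw : 2 * (2 ^ k - 1) + 1 = 2 ^ (k + 1) - 1 := by
        have : 2 ^ (k + 1) = 2 * 2 ^ k := by ring
        omega
      simp [hw]

theorem rows_eq (l : List Int) : visualize_heap_go l 0 0 = visualize_heap_alt_go 0 l [] := by
  have ha := goA_eq_chunks l l.length 0 (by omega)
  have hb := goB_eq_chunks l.length l (le_refl _) 0 [] rfl
  simp at ha hb
  rw [show (0:Nat) = 2 * 0 from rfl] at ha
  rw [ha]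
  simpa using hb.symm

-- ===== VERDICT (by name: the statement is the Claim_ definition above) =====
theorem visualize_heap_spec : Claim_equal_visualize_heap := by
  intro l _
  unfold Spec_visualize_heap visualize_heap visualize_heap_alt
  rw [rows_eq]
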